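-- pv_equiv track=rewrite | github.com/webashrat/digichess | digichess-backend/games/tournament_lifecycle.py | _round_robin_pairings
-- ===== SOURCE A (Python) =====
-- from typing import Dict, List, Optional, Sequence, Tuple
--
-- def _round_robin_pairings(
--     participant_ids: List[int],
--     round_number: int,
-- ) -> List[Tuple[int, int]]:
--     players = participant_ids[:]
--     if len(players) % 2 == 1:
--         players.append(None)
--     slots = len(players)
--     if slots < 2:
--         return []
--
--     rotation = players[:]
--     for _ in range(round_number - 1):
--         rotation = [rotation[0]] + [rotation[-1]] + rotation[1:-1]
--
--     pairings = []
--     for idx in range(slots // 2):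
--         left = rotation[idx]
--         right = rotation[slots - 1 - idx]
--         if left is None or right is None:
--             continue
--         if round_number % 2 == 1:
--             white_id, black_id = (left, right) if idx % 2 == 0 else (right, left)
--         else:
--             white_id, black_id = (right, left) if idx % 2 == 0 else (left, right)
--         pairings.append((white_id, black_id))
--     return pairings
-- ===== SOURCE B (Python) =====
-- def _round_robin_pairings(participant_ids, round_number):
--     # Closed-form cyclic rotation: A rotates the tail once per elapsed round;
--     # here the rotated slot is computed directly by modular arithmetic.
--     n = len(participant_ids)
--     slots = n + (n % 2)
--     if slots < 2:
--         return []
--     m = slots - 1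
--     k = max(round_number - 1, 0) % m
--     flip = round_number % 2 == 0
--
--     def slot(i):
--         j = 0 if i == 0 else 1 + (i - 1 - k) % m
--         return participant_ids[j] if j < n else None
--
--     pairings = []
--     for idx in range(slots // 2):
--         left = slot(idx)
--         right = slot(slots - 1 - idx)
--         if left is None or right is None:
--             continue
--         if (idx % 2 == 0) != flip:
--             pairings.append((left, right))
--         else:
--             pairings.append((right, left))
--     return pairings
-- ===== Notes on version B (the rewrite author's own statement) =====
-- stated objective: faster
-- what changed: A materialises the rotation by rebuilding the list round_number-1 times; B computes each rotated slot directly with modular arithmetic ((i-1-k) mod (slots-1)), needing no iteration over rounds.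
import Mathlib
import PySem

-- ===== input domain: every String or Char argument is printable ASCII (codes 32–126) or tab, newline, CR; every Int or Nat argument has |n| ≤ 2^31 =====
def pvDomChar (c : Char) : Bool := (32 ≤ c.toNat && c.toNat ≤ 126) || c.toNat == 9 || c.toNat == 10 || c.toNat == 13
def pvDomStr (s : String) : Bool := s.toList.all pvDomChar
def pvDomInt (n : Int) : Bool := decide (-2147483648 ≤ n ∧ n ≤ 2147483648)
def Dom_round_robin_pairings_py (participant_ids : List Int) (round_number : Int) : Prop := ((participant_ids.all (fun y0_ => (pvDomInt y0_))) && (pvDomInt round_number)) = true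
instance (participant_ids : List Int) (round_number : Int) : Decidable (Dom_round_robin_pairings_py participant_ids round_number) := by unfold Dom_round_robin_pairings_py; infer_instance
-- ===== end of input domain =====

-- B replaces A's round-by-round list rebuilding with a direct modular-arithmetic
-- computation of each rotated slot (objective: faster; asymptotic in round_number).

-- ===== PORT A =====
-- one step of A's loop body: rotation = [rotation[0]] + [rotation[-1]] + rotation[1:-1]
-- ([] case unreachable: Python's rotation[0] would raise, but A only rotates lists of length ≥ 2)
def pvRotOnce (l : List (Option Int)) : List (Option Int) :=
  match l with
  | [] => []
  | x :: rest => x :: (x :: rest).getLast (by simp) :: rest.dropLast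

def round_robin_pairings_py (participant_ids : List Int) (round_number : Int) : List (Int × Int) :=
  let players0 : List (Option Int) := participant_ids.map some
  let players := if players0.length % 2 == 1 then players0 ++ [none] else players0
  let slots := players.length
  if slots < 2 then []
  else
    -- for _ in range(round_number - 1): one rotation per iteration
    let rotation := pvRotOnce^[(round_number - 1).toNat] players
    (List.range (slots / 2)).foldl (fun acc idx =>
      -- indices idx and slots-1-idx are always in range, so getD is exact for rotation[...]
      match rotation.getD idx none, rotation.getD (slots - 1 - idx) none with
      | some left, some right =>
          if PySem.Int.mod round_number 2 == 1 then
            acc ++ [if idx % 2 == 0 then (left, right) else (right, left)]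
          else
            acc ++ [if idx % 2 == 0 then (right, left) else (left, right)]
      | _, _ => acc) []

-- ===== PORT B =====
def round_robin_pairings_py_alt (participant_ids : List Int) (round_number : Int) : List (Int × Int) :=
  let n := participant_ids.length
  let slots := n + n % 2
  if slots < 2 then []
  else
    let m : Int := (slots : Int) - 1
    let k : Int := PySem.Int.mod (max (round_number - 1) 0) m
    let flip := PySem.Int.mod round_number 2 == 0
    let slot := fun (i : Nat) =>
      let j : Int := if i == 0 then 0 else 1 + PySem.Int.mod ((i : Int) - 1 - k) m
      -- 0 ≤ j always, so participant_ids[j] is getD j.toNat (exact when j < n)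
      if j < (n : Int) then some (participant_ids.getD j.toNat 0) else none
    (List.range (slots / 2)).filterMap (fun idx =>
      -- 'if left is None or right is None: continue'
      match slot idx with
      | none => none
      | some left =>
        match slot (slots - 1 - idx) with
        | none => none
        | some right =>
            some (if (decide (idx % 2 = 0)) != flip then (left, right) else (right, left)))

-- ===== PRECONDITION & SPEC =====
def Spec_round_robin_pairings_py (participant_ids : List Int) (round_number : Int) (out : List (Int × Int)) : Prop := out = round_robin_pairings_py_alt participant_ids round_number
instance (participant_ids : List Int) (round_number : Int) (out : List (Int × Int)) : Decidable (Spec_round_robin_pairings_py participant_ids round_number out) := by unfold Spec_round_robin_pairings_py; infer_instance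

-- ===== CLAIM (what is proved, stated in full; the proofs are below) =====
def Claim_equal_round_robin_pairings_py : Prop := ∀ (participant_ids : List Int) (round_number : Int), Dom_round_robin_pairings_py participant_ids round_number → Spec_round_robin_pairings_py participant_ids round_number (round_robin_pairings_py participant_ids round_number)

-- ===== LEMMAS AND PROOFS =====

-- the left-rotation by length-1 is exactly one step of A's rotation of the tail
theorem pvRotate_last {α : Type} (l : List α) (h : l ≠ []) :
    l.rotate (l.length - 1) = l.getLast h :: l.dropLast := by
  rw [List.rotate_eq_drop_append_take (by omega), List.drop_length_sub_one h,
    ← List.dropLast_eq_take]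
  simp

theorem pvRotOnce_cons (x : Option Int) (rest : List (Option Int)) (h : rest ≠ []) :
    pvRotOnce (x :: rest) = x :: rest.rotate (rest.length - 1) := by
  rw [pvRotate_last rest h]
  simp [pvRotOnce, List.getLast_cons h]

theorem pvRotOnce_iter (k : Nat) (x : Option Int) (rest : List (Option Int)) (h : rest ≠ []) :
    pvRotOnce^[k] (x :: rest) = x :: rest.rotate (k * (rest.length - 1)) := by
  induction k with
  | zero => simp
  | succ k ih =>
    rw [Function.iterate_succ_apply', ih]
    have hne : rest.rotate (k * (rest.length - 1)) ≠ [] := by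
      simp [← List.length_pos_iff] at h ⊢; omega
    rw [pvRotOnce_cons _ _ hne, List.length_rotate, List.rotate_rotate]
    ring_nf

theorem pvFoldl_filterMap {α β : Type} (g : α → Option β) (f : List β → α → List β)
    (hf : ∀ acc a, f acc a = acc ++ (g a).toList) :
    ∀ (l : List α) (acc : List β), l.foldl f acc = acc ++ l.filterMap g := by
  intro l
  induction l with
  | nil => simp
  | cons a t ih =>
    intro acc
    rw [List.foldl_cons, hf, List.filterMap_cons, ih]
    cases g a <;> simp


-- index arithmetic: B's modular index equals the index reached by A's accumulated rotation
theorem pvIdx (t kA m : Nat) (hm : 1 ≤ m) :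
    ((t : ℤ) - (kA : ℤ) % (m : ℤ)) % (m : ℤ) = (((t + kA * (m - 1)) % m : Nat) : ℤ) := by
  have h1 : ((t:ℤ) - (kA:ℤ) % m) % m = ((t:ℤ) - kA) % m := by
    rw [Int.sub_emod, Int.emod_emod_of_dvd _ dvd_rfl, ← Int.sub_emod]
  have hm1 : ((m - 1 : Nat) : ℤ) = (m:ℤ) - 1 := by omega
  have h2 : (((t + kA * (m - 1)) % m : Nat) : ℤ) = ((t:ℤ) - (kA:ℤ)) % m := by
    push_cast [hm1]
    rw [show (t:ℤ) + (kA:ℤ) * ((m:ℤ) - 1) = ((t:ℤ) - kA) + kA * m by ring,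
      Int.add_mul_emod_self_right]
  rw [h1, h2]

-- the padded tail read at s, in terms of the original list
theorem pvRestGet (ps : List Int) (pad : List (Option Int)) (s : Nat)
    (hpad : pad = [] ∨ pad = [(none : Option Int)]) (hs : s < ps.length + pad.length) :
    (ps.map some ++ pad).getD s none = if s < ps.length then some (ps.getD s 0) else none := by
  by_cases h : s < ps.length
  · rw [List.getD_eq_getElem _ _ (by simp; omega), List.getElem_append_left (by simp; omega),
      List.getElem_map, if_pos h, List.getD_eq_getElem _ _ h]
  · rcases hpad with rfl | rfl
    · simp at hs; omega
    · simp at hs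
      have hs' : s = ps.length := by omega
      rw [List.getD_eq_getElem _ _ (by simp; omega), List.getElem_append_right (by simp; omega)]
      simp [hs']

theorem pvMain (pids : List Int) (rn : Int) :
    round_robin_pairings_py pids rn = round_robin_pairings_py_alt pids rn := by
  cases pids with
  | nil => rfl
  | cons p ps =>
    unfold round_robin_pairings_py round_robin_pairings_py_alt
    simp only []
    set nn := (p :: ps).length with hnn
    have hnn' : nn = ps.length + 1 := by simp [hnn]
    set pad : List (Option Int) := if nn % 2 == 1 then [(none : Option Int)] else [] with hpaddef
    have hplayers : (if ((p :: ps).map some).length % 2 == 1 then (p :: ps).map some ++ [(none : Option Int)] else (p :: ps).map some) = (p :: ps).map some ++ pad := by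
      simp only [List.length_map, ← hnn, hpaddef]
      split <;> simp
    rw [hplayers]
    set rest : List (Option Int) := ps.map some ++ pad with hrest
    have hpadlen : pad.length = nn % 2 := by
      rw [hpaddef]; rcases Nat.mod_two_eq_zero_or_one nn with h | h <;> simp [h]
    have hplen : ((p :: ps).map some ++ pad).length = nn + nn % 2 := by
      simp [hpadlen]
      omega
    set slots := nn + nn % 2 with hslots
    have hslots2 : 2 ≤ slots := by omega
    rw [hplen]
    rw [if_neg (by omega), if_neg (by omega)]
    set m := slots - 1 with hm
    have hm1 : 1 ≤ m := by omega
    have hrestlen : rest.length = m := by simp [hrest, hpadlen]; omega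
    set kA := (rn - 1).toNat with hkA
    have hrot : pvRotOnce^[kA] ((p :: ps).map some ++ pad) = some p :: rest.rotate (kA * (m - 1)) := by
      have : (p :: ps).map some ++ pad = some p :: rest := by simp [hrest]
      rw [this, pvRotOnce_iter _ _ _ (by rw [← List.length_pos_iff]; omega), hrestlen]
    rw [hrot]
    -- B's parameters
    have hk : PySem.Int.mod (max (rn - 1) 0) ((slots : ℤ) - 1) = (kA : ℤ) % (m : ℤ) := by
      rw [PySem.Int.mod_eq_emod_of_pos (by omega), ← Int.ofNat_toNat (rn - 1)]
      congr 1
      omega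
    -- pointwise value of the rotated list = B's slot expression
    have hval : ∀ i : Nat, i < slots →
        (some p :: rest.rotate (kA * (m - 1))).getD i none =
        (if (if i == 0 then (0:ℤ) else 1 + PySem.Int.mod ((i : ℤ) - 1 - ((kA : ℤ) % (m : ℤ))) ((slots : ℤ) - 1)) < (nn : ℤ)
          then some ((p :: ps).getD (if i == 0 then (0:ℤ) else 1 + PySem.Int.mod ((i : ℤ) - 1 - ((kA : ℤ) % (m : ℤ))) ((slots : ℤ) - 1)).toNat 0)
          else none) := by
      intro i hi
      match i with
      | 0 => simp [hnn']
      | t + 1 =>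
        have ht : t < m := by omega
        have hmod : PySem.Int.mod (((t+1 : Nat) : ℤ) - 1 - ((kA : ℤ) % (m : ℤ))) ((slots : ℤ) - 1) = (((t + kA * (m - 1)) % m : Nat) : ℤ) := by
          rw [PySem.Int.mod_eq_emod_of_pos (by omega)]
          rw [show ((slots : ℤ) - 1) = (m : ℤ) by omega]
          rw [show (((t+1 : Nat) : ℤ) - 1 - ((kA : ℤ) % (m : ℤ))) = ((t : ℤ) - (kA : ℤ) % (m : ℤ)) by push_cast; ring]
          exact pvIdx t kA m hm1
        set s' := (t + kA * (m - 1)) % m with hs'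
        have hs'm : s' < m := Nat.mod_lt _ (by omega)
        have hL : (some p :: rest.rotate (kA * (m - 1))).getD (t+1) none = rest.getD s' none := by
          have hlt : t < (rest.rotate (kA * (m - 1))).length := by rw [List.length_rotate, hrestlen]; exact ht
          rw [List.getD_cons_succ, List.getD_eq_getElem _ _ hlt, List.getElem_rotate,
            List.getD_eq_getElem _ _ (by rw [hrestlen]; exact Nat.mod_lt _ (by omega))]
          congr 1
          rw [hrestlen]
        have hj : (if ((t+1 : Nat) == 0) = true then (0:ℤ) else 1 + PySem.Int.mod ((((t+1) : Nat) : ℤ) - 1 - ((kA : ℤ) % (m : ℤ))) ((slots : ℤ) - 1)) = ((s' : ℤ) + 1) := by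
          rw [if_neg (by simp), hmod]; ring
        rw [hL, hj]
        rw [pvRestGet ps pad s' (by rw [hpaddef]; split <;> simp) (by omega)]
        by_cases hsn : s' < ps.length
        · rw [if_pos hsn, if_pos (by omega)]
          rw [show ((s' : ℤ) + 1).toNat = s' + 1 by omega]
          simp
        · rw [if_neg hsn, if_neg (by omega)]
    -- turn A's foldl into a filterMap
    set rot := some p :: rest.rotate (kA * (m - 1)) with hrotdef
    set gA : Nat → Option (Int × Int) := fun idx =>
      match rot.getD idx none, rot.getD (slots - 1 - idx) none with
      | some left, some right =>
          some (if PySem.Int.mod rn 2 == 1 then (if idx % 2 == 0 then (left, right) else (right, left))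
                else (if idx % 2 == 0 then (right, left) else (left, right)))
      | _, _ => none with hgA
    have hAfold : List.foldl (fun acc idx =>
        match rot.getD idx none, rot.getD (slots - 1 - idx) none with
        | some left, some right =>
            if PySem.Int.mod rn 2 == 1 then
              acc ++ [if idx % 2 == 0 then (left, right) else (right, left)]
            else
              acc ++ [if idx % 2 == 0 then (right, left) else (left, right)]
        | _, _ => acc) [] (List.range (slots / 2)) = List.filterMap gA (List.range (slots / 2)) := by
      rw [pvFoldl_filterMap gA _ ?_ (List.range (slots / 2)) []]
      · simp
      · intro acc idx
        simp only [hgA]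
        cases hA : rot.getD idx none <;> cases hB : rot.getD (slots - 1 - idx) none <;>
          (split_ifs <;> simp)
    rw [hAfold]
    apply List.filterMap_congr
    intro idx hidx
    rw [List.mem_range] at hidx
    have hidx1 : idx < slots := by omega
    have hidx2 : slots - 1 - idx < slots := by omega
    rw [hgA]
    simp only
    rw [hval idx hidx1, hval (slots - 1 - idx) hidx2, hk]
    rcases (if (if idx == 0 then (0:ℤ) else 1 + PySem.Int.mod ((idx : ℤ) - 1 - ((kA : ℤ) % (m : ℤ))) ((slots : ℤ) - 1)) < (nn : ℤ)
          then some ((p :: ps).getD (if idx == 0 then (0:ℤ) else 1 + PySem.Int.mod ((idx : ℤ) - 1 - ((kA : ℤ) % (m : ℤ))) ((slots : ℤ) - 1)).toNat 0)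
          else none) with _ | l
    · simp
    · rcases (if (if (slots - 1 - idx) == 0 then (0:ℤ) else 1 + PySem.Int.mod (((slots - 1 - idx : Nat) : ℤ) - 1 - ((kA : ℤ) % (m : ℤ))) ((slots : ℤ) - 1)) < (nn : ℤ)
          then some ((p :: ps).getD (if (slots - 1 - idx) == 0 then (0:ℤ) else 1 + PySem.Int.mod (((slots - 1 - idx : Nat) : ℤ) - 1 - ((kA : ℤ) % (m : ℤ))) ((slots : ℤ) - 1)).toNat 0)
          else none) with _ | r
      · simp
      · simp only
        rcases PySem.Int.mod_two_eq rn with h2 | h2 <;> rw [h2] <;>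
          by_cases he : idx % 2 = 0 <;> simp [he]

-- ===== VERDICT (by name: the statement is the Claim_ definition above) =====
theorem round_robin_pairings_py_spec : Claim_equal_round_robin_pairings_py := by
  intro pids rn _
  exact pvMain pids rn
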